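-- pv_equiv track=rewrite | github.com/jorio/rsrcdump | rsrcdump/resconverters.py | split_struct_format_fields
-- ===== SOURCE A (Python) =====
-- from typing import Any, Callable, Generator
--
-- def split_struct_format_fields(fmt: str) -> Generator[str, None, None]:
--     repeat = 0
--
--     for c in fmt:
--         if c.isspace():
--             continue
--
--         elif c in "@!><=":
--             continue
--
--         elif c in "0123456789":
--             if repeat != 0:
--                 repeat *= 10
--             repeat += ord(c) - ord('0')
--             continue
--
--         elif c.upper() in "CB?HILFQD":
--             for _ in range(max(repeat, 1)):
--                 yield c
--             repeat = 0
--
--         elif c == "s":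
--             yield f"{max(repeat, 1)}{c}"
--             repeat = 0
--
--         else:
--             raise ValueError(f"Unsupported struct format character '{c}'")
-- ===== SOURCE B (Python) =====
-- import re
--
-- def split_struct_format_fields(fmt):
--     # strip whitespace and byte-order/alignment chars, then walk number+symbol groups
--     cleaned = "".join(c for c in fmt if not (c.isspace() or c in "@!><="))
--     for m in re.finditer(r'(\d*)(\D)', cleaned):
--         digits, sym = m.group(1), m.group(2)
--         count = max(int(digits) if digits else 0, 1)
--         if sym in "CcBb?HhIiLlFfQqDd":
--             for _ in range(count):
--                 yield sym
--         elif sym == "s":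
--             yield f"{count}s"
--         else:
--             raise ValueError(f"Unsupported struct format character '{sym}'")
-- ===== Notes on version B (the rewrite author's own statement) =====
-- stated objective: idiomatic
-- what changed: B first strips whitespace and alignment chars in one filtering pass, then walks the cleaned string with re.finditer(r'(\d*)(\D)') matching a maximal digit run plus one symbol per step, replacing A's char-by-char state machine with its hand-rolled decimal accumulator.
import Mathlib
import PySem

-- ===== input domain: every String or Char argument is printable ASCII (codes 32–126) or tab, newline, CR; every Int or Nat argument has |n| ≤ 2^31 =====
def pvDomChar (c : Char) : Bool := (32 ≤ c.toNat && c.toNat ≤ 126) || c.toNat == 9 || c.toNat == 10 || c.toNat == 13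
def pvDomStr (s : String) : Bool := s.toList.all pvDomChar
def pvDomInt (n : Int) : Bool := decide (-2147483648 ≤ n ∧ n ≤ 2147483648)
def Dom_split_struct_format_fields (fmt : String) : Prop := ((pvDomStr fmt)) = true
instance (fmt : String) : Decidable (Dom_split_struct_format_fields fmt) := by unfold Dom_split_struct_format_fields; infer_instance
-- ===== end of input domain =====

-- B strips whitespace/alignment chars first and then parses digit-run+symbol groups
-- (the regex r'(\d*)(\D)') instead of A's char-by-char state machine with its
-- hand-rolled decimal accumulator; same cost, more idiomatic.  Both Pythons are
-- generators; the ports compare the fully consumed output list.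

-- ===== PORT A =====
-- character class literals of A
def pvSkipA : List Char := "@!><=".toList
def pvDigitsA : List Char := "0123456789".toList
def pvUpperA : List Char := "CB?HILFQD".toList

-- the loop of A: state `repeat` (r), one character at a time
def pvGoA : Nat → List Char → List String
  | _, [] => []
  | r, c :: cs =>
    if PySem.Chars.isspace c then pvGoA r cs
    else if c ∈ pvSkipA then pvGoA r cs
    else if c ∈ pvDigitsA then
      pvGoA ((if r ≠ 0 then r * 10 else r) + (c.toNat - 48)) cs
    else if PySem.Chars.upperChar c ∈ pvUpperA then
      List.replicate (max r 1) (String.mk [c]) ++ pvGoA 0 cs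
    else if c = 's' then
      String.mk (PySem.Int.toChars (max r 1) ++ ['s']) :: pvGoA 0 cs
    else []  -- raise ValueError: excluded by Pre_

def split_struct_format_fields (fmt : String) : List String :=
  pvGoA 0 fmt.toList

-- ===== PORT B =====
-- character class literals of B
def pvSkipB : List Char := "@!><=".toList
def pvLettersB : List Char := "CcBb?HhIiLlFfQqDd".toList
-- characters kept by B's filtering pass
def pvKeep (c : Char) : Bool := !(PySem.Chars.isspace c || decide (c ∈ pvSkipB))
-- int(digits) for a pure digit run (exact there)
def pvNatOfDigits (ds : List Char) : Nat := ds.foldl (fun a c => a * 10 + (c.toNat - 48)) 0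
-- what one regex group (count, symbol) yields
def pvEmit (count : Nat) (c : Char) : List String :=
  if c ∈ pvLettersB then List.replicate count (String.mk [c])
  else if c = 's' then [String.mk (PySem.Int.toChars (count : Int) ++ ['s'])]
  else []  -- raise ValueError: excluded by Pre_

-- re.finditer(r'(\d*)(\D)') on `l`: each match is the maximal digit prefix plus one
-- non-digit; trailing digits match nothing (exact for this regex, ported by hand)
def pvGoB (l : List Char) : List String :=
  match h : l.dropWhile PySem.Chars.isdigit with
  | [] => []
  | c :: cs =>
    pvEmit (max (pvNatOfDigits (l.takeWhile PySem.Chars.isdigit)) 1) c ++ pvGoB cs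
termination_by l.length
decreasing_by
  have hle := List.length_dropWhile_le PySem.Chars.isdigit l
  rw [h] at hle; simp at hle; omega

def split_struct_format_fields_alt (fmt : String) : List String :=
  pvGoB (fmt.toList.filter pvKeep)

-- ===== PRECONDITION & SPEC =====
-- characters on which A (and B) return without raising ValueError
def pvAllowed : List Char :=
  [' ', '\t', '\n', '\r', '@', '!', '>', '<', '=',
   '0', '1', '2', '3', '4', '5', '6', '7', '8', '9',
   'C', 'c', 'B', 'b', '?', 'H', 'h', 'I', 'i', 'L', 'l', 'F', 'f', 'Q', 'q', 'D', 'd', 's']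
-- Pre_ excludes exactly the strings containing an unsupported struct format
-- character, on which A raises ValueError
def Pre_split_struct_format_fields (fmt : String) : Prop :=
  fmt.toList.all (fun c => pvAllowed.contains c) = true
instance (fmt : String) : Decidable (Pre_split_struct_format_fields fmt) := by
  unfold Pre_split_struct_format_fields; infer_instance
def pvWitness_split_struct_format_fields : String := "B 2i >4s 0q"
def Spec_split_struct_format_fields (fmt : String) (out : List String) : Prop := out = split_struct_format_fields_alt fmt
instance (fmt : String) (out : List String) : Decidable (Spec_split_struct_format_fields fmt out) := by unfold Spec_split_struct_format_fields; infer_instance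

-- ===== CLAIM (what is proved, stated in full; the proofs are below) =====
def Claim_equal_split_struct_format_fields : Prop := ∀ (fmt : String), Dom_split_struct_format_fields fmt → Pre_split_struct_format_fields fmt → Spec_split_struct_format_fields fmt (split_struct_format_fields fmt)

-- ===== LEMMAS AND PROOFS =====

-- the characters surviving B's filter inside Pre_
def pvGood : List Char :=
  ['0', '1', '2', '3', '4', '5', '6', '7', '8', '9',
   'C', 'c', 'B', 'b', '?', 'H', 'h', 'I', 'i', 'L', 'l', 'F', 'f', 'Q', 'q', 'D', 'd', 's']

-- A's loop with pending count r on an already-cleaned list (B's grouping, unrolled)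
def pvGoBpend : Nat → List Char → List String
  | _, [] => []
  | r, c :: cs =>
    if PySem.Chars.isdigit c then pvGoBpend (r * 10 + (c.toNat - 48)) cs
    else pvEmit (max r 1) c ++ pvGoBpend 0 cs

-- pvGoB generalized to an initial accumulator r on the first digit run
def pvGoBfrom (r : Nat) (l : List Char) : List String :=
  match l.dropWhile PySem.Chars.isdigit with
  | [] => []
  | c :: cs =>
    pvEmit (max ((l.takeWhile PySem.Chars.isdigit).foldl (fun a c => a * 10 + (c.toNat - 48)) r) 1) c ++ pvGoB cs

-- unfolding equations for pvGoB (its definition uses a dependent match)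
lemma pvGoB_nil (l : List Char) (h : l.dropWhile PySem.Chars.isdigit = []) : pvGoB l = [] := by
  rw [pvGoB.eq_def]
  split
  · rfl
  · rename_i heq; rw [h] at heq; cases heq

lemma pvGoB_cons (l : List Char) (c : Char) (cs : List Char)
    (h : l.dropWhile PySem.Chars.isdigit = c :: cs) :
    pvGoB l = pvEmit (max (pvNatOfDigits (l.takeWhile PySem.Chars.isdigit)) 1) c ++ pvGoB cs := by
  rw [pvGoB.eq_def]
  split
  · rename_i heq; rw [h] at heq; cases heq
  · rename_i c' cs' heq; rw [h] at heq; cases heq; rfl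

lemma pvGoB_eq_from (l : List Char) : pvGoB l = pvGoBfrom 0 l := by
  cases hm : l.dropWhile PySem.Chars.isdigit with
  | nil => rw [pvGoB_nil l hm, pvGoBfrom, hm]
  | cons c cs => rw [pvGoB_cons l c cs hm, pvGoBfrom, hm, pvNatOfDigits]

lemma pvKeep_good : ∀ c ∈ pvAllowed, pvKeep c = true → c ∈ pvGood := by
  intro c hc
  fin_cases hc <;> decide

lemma pvGood_char : ∀ c ∈ pvGood,
    PySem.Chars.isspace c = false ∧ c ∉ pvSkipA ∧
    ( (c ∈ pvDigitsA ∧ PySem.Chars.isdigit c = true)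
    ∨ (c ∉ pvDigitsA ∧ PySem.Chars.isdigit c = false ∧
         PySem.Chars.upperChar c ∈ pvUpperA ∧ c ∈ pvLettersB)
    ∨ (c ∉ pvDigitsA ∧ PySem.Chars.isdigit c = false ∧
         PySem.Chars.upperChar c ∉ pvUpperA ∧ c ∉ pvLettersB ∧ c = 's') ) := by
  intro c hc
  fin_cases hc <;> decide

lemma pvAccum (r d : Nat) : (if r = 0 then r else r * 10) + d = r * 10 + d := by
  by_cases h : r = 0 <;> simp [h]

-- Lemma 1: A skips exactly the characters B's filter removes
lemma pvGoA_filter (l : List Char) (r : Nat) : pvGoA r l = pvGoA r (l.filter pvKeep) := by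
  induction l generalizing r with
  | nil => rfl
  | cons c cs ih =>
    by_cases hsp : PySem.Chars.isspace c = true
    · have hk : pvKeep c = false := by simp [pvKeep, hsp]
      simp [pvGoA, hsp, List.filter_cons, hk, ih]
    · by_cases hsk : c ∈ pvSkipB
      · have hk : pvKeep c = false := by simp [pvKeep, hsk]
        have hskA : c ∈ pvSkipA := hsk
        simp [pvGoA, hsp, hskA, List.filter_cons, hk, ih]
      · have hk : pvKeep c = true := by simp [pvKeep, hsp, hsk]
        have hskA : c ∉ pvSkipA := hsk
        simp only [List.filter_cons, hk, if_pos]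
        by_cases hd : c ∈ pvDigitsA
        · simp [pvGoA, hsp, hskA, hd, ih]
        · by_cases hu : PySem.Chars.upperChar c ∈ pvUpperA
          · simp [pvGoA, hsp, hskA, hd, hu, ih]
          · by_cases hs : c = 's'
            · simp [pvGoA, hsp, hskA, hd, hu, hs, ih]
            · simp [pvGoA, hsp, hskA, hd, hu, hs]

-- Lemma 2: on cleaned (all-good) input, A's state machine is B's grouping with pending r
lemma pvGoA_pend (l : List Char) (r : Nat) (hg : ∀ c ∈ l, c ∈ pvGood) :
    pvGoA r l = pvGoBpend r l := by
  induction l generalizing r with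
  | nil => rfl
  | cons c cs ih =>
    have hc := pvGood_char c (hg c (List.mem_cons_self ..))
    have hg' : ∀ x ∈ cs, x ∈ pvGood := fun x hx => hg x (List.mem_cons_of_mem _ hx)
    obtain ⟨hsp, hsk, hcase⟩ := hc
    rcases hcase with ⟨hd, hd'⟩ | ⟨hd, hd', hu, hl⟩ | ⟨hd, hd', hu, hl, hs⟩
    · simp [pvGoA, pvGoBpend, hsp, hsk, hd, hd', pvAccum, ih _ hg']
    · simp [pvGoA, pvGoBpend, pvEmit, hsp, hsk, hd, hd', hu, hl, Nat.cast_max, ih _ hg']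
    · subst hs
      simp [pvGoA, pvGoBpend, pvEmit, hsp, hsk, hd, hd', hu, hl, Nat.cast_max, ih _ hg']

-- Lemma 3: the pending-accumulator form equals the span-grouped pvGoB form
lemma pvPend_eq_from (l : List Char) (r : Nat) : pvGoBpend r l = pvGoBfrom r l := by
  induction l generalizing r with
  | nil => rfl
  | cons c cs ih =>
    cases hd : PySem.Chars.isdigit c with
    | true =>
      simp only [pvGoBpend, hd, if_pos]
      rw [ih]
      simp [pvGoBfrom, List.dropWhile, List.takeWhile, hd]
    | false =>
      simp only [pvGoBpend, hd, Bool.false_eq_true, if_neg, not_false_iff]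
      rw [ih, ← pvGoB_eq_from]
      simp [pvGoBfrom, List.dropWhile, List.takeWhile, hd]

-- ===== VERDICT (by name: the statement is the Claim_ definition above) =====
theorem split_struct_format_fields_spec : Claim_equal_split_struct_format_fields := by
  intro fmt _ hpre
  unfold Spec_split_struct_format_fields split_struct_format_fields split_struct_format_fields_alt
  have hpre' : ∀ c ∈ fmt.toList, c ∈ pvAllowed := by
    unfold Pre_split_struct_format_fields at hpre
    simpa [List.all_eq_true] using hpre
  have hg : ∀ c ∈ fmt.toList.filter pvKeep, c ∈ pvGood := by
    intro c hc
    rw [List.mem_filter] at hc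
    exact pvKeep_good c (hpre' c hc.1) hc.2
  rw [pvGoA_filter, pvGoA_pend _ _ hg, pvPend_eq_from, ← pvGoB_eq_from]
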